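-- pv_equiv track=rewrite | github.com/kemingy/daily-coding-problem | src/bitwise_to_true.py | num_of_true
-- ===== SOURCE A (Python) =====
-- def compute(x, op, y):
--     if op == '&':
--         return 'T' if x == 'T' and y == 'T' else 'F'
--     elif op == '|':
--         return 'T' if x == 'T' or y == 'T' else 'F'
--     elif op == '^':
--         return 'T' if x != y else 'F'
--
-- def num_of_true(values):
--     results = []
--
--     def helper(values, history):
--         if len(values) == 1 and values[0] == 'T':
--             results.append(history)
--             return
--         for i in range(len(values) - 2):
--             new_value = values[:i] + [compute(*values[i:i+3])] + values[i+3:]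
--             new_history = history[:i] + \
--                 ['(' + ' '.join(history[i:i+3]) + ')'] + history[i+3:]
--             helper(new_value, new_history)
--
--     helper(values, values)
--     return results
-- ===== SOURCE B (Python) =====
-- def compute(x, op, y):
--     if op == '&':
--         return 'T' if x == 'T' and y == 'T' else 'F'
--     elif op == '|':
--         return 'T' if x == 'T' or y == 'T' else 'F'
--     elif op == '^':
--         return 'T' if x != y else 'F'
--
-- def num_of_true(values):
--     # iterative DFS with an explicit stack instead of A's nested recursion
--     results = []
--     stack = [(values, values)]
--     while stack:
--         vals, hist = stack.pop()
--         if len(vals) == 1 and vals[0] == 'T':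
--             results.append(hist)
--             continue
--         children = []
--         for i in range(len(vals) - 2):
--             nv = vals[:i] + [compute(*vals[i:i+3])] + vals[i+3:]
--             nh = hist[:i] + ['(' + ' '.join(hist[i:i+3]) + ')'] + hist[i+3:]
--             children.append((nv, nh))
--         stack.extend(reversed(children))
--     return results
-- ===== Notes on version B (the rewrite author's own statement) =====
-- stated objective: alternative
-- what changed: A's nested recursive helper with a shared results closure is replaced by an iterative DFS over an explicit stack of (values, history) frames, pushing children in reverse so pop order reproduces A's pre-order traversal exactly.
import Mathlib
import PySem

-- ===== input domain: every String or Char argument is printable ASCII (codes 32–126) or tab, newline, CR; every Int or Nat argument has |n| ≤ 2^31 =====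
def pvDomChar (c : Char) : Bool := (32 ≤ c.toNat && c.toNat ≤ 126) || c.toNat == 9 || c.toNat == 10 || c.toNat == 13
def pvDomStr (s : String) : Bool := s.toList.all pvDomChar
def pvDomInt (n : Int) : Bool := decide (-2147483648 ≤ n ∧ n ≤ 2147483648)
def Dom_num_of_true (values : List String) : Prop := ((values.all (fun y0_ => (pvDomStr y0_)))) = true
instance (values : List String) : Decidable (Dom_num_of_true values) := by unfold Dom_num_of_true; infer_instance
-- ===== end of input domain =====

-- B replaces A's nested recursive helper by an iterative DFS over an explicit stack of
-- (values, history) frames (alternative decomposition; same cost, same output order).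

-- ===== PORT A =====
-- compute can return Python None (op not '&','|','^'), so values circulate as Option String.
def computeA (x op y : Option String) : Option String :=
  if op = some "&" then some (if x = some "T" ∧ y = some "T" then "T" else "F")
  else if op = some "|" then some (if x = some "T" ∨ y = some "T" then "T" else "F")
  else if op = some "^" then some (if x ≠ y then "T" else "F")
  else none

-- the nested `helper`: `loopA` is its `for i in range(len(values)-2)` loop
-- (a Python range is empty for a negative bound, so the Nat `length - 2` is exact);
-- slices with the nonnegative bounds i / i+3 are List.take / List.drop.
mutual
def helperA (values : List (Option String)) (history : List String)
    (results : List (List String)) : List (List String) :=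
  if values.length = 1 ∧ values.head? = some (some "T") then results ++ [history]
  else loopA values history results 0
termination_by (values.length, 1, 0)
decreasing_by exact Prod.Lex.right _ (Prod.Lex.left _ _ (by omega))

def loopA (values : List (Option String)) (history : List String)
    (results : List (List String)) (i : Nat) : List (List String) :=
  if i < values.length - 2 then
    let new_value := values.take i ++
      [computeA (values.getD i none) (values.getD (i+1) none) (values.getD (i+2) none)] ++
      values.drop (i+3)
    let new_history := history.take i ++
      ["(" ++ PySem.Str.join " " ((history.take (i+3)).drop i) ++ ")"] ++
      history.drop (i+3)
    loopA values history (helperA new_value new_history results) (i+1)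
  else results
termination_by (values.length, 0, values.length - 2 - i)
decreasing_by
  · refine Prod.Lex.left _ _ ?_
    simp only [List.length_append, List.length_take, List.length_drop,
      List.length_cons, List.length_nil]
    omega
  · exact Prod.Lex.right _ (Prod.Lex.right _ (by omega))
end

def num_of_true (values : List String) : List (List String) :=
  helperA (values.map some) values []

-- ===== PORT B =====
def computeB (x op y : Option String) : Option String :=
  if op = some "&" then some (if x = some "T" ∧ y = some "T" then "T" else "F")
  else if op = some "|" then some (if x = some "T" ∨ y = some "T" then "T" else "F")
  else if op = some "^" then some (if x ≠ y then "T" else "F")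
  else none

-- one child frame of Source B's inner for-loop body
def childB (vs : List (Option String)) (hist : List String) (i : Nat) :
    List (Option String) × List String :=
  (vs.take i ++
     [computeB (vs.getD i none) (vs.getD (i+1) none) (vs.getD (i+2) none)] ++
     vs.drop (i+3),
   hist.take i ++
     ["(" ++ PySem.Str.join " " ((hist.take (i+3)).drop i) ++ ")"] ++
     hist.drop (i+3))

-- stack measure for the while loop: each popped frame of length n is replaced by
-- at most n-2 frames of length n-2, and (n-2)·(n-2)! < n!
def stackW (st : List (List (Option String) × List String)) : Nat :=
  (st.map (fun f => Nat.factorial f.1.length)).sum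

-- the `while stack:` loop; list head = top of stack; stack.extend(reversed(children))
-- followed by pops means the children are processed in ascending i order, i.e. children ++ rest.
def goB : List (List (Option String) × List String) → List (List String) → List (List String)
  | [], results => results
  | (vs, hist) :: rest, results =>
    if vs.length = 1 ∧ vs.head? = some (some "T") then goB rest (results ++ [hist])
    else goB (((List.range (vs.length - 2)).map (childB vs hist)) ++ rest) results
termination_by stack _ => stackW stack
decreasing_by
  · have := Nat.factorial_pos vs.length
    simp only [stackW, List.map_cons, List.sum_cons]
    omega
  · simp only [stackW, List.map_append, List.sum_append, List.map_cons, List.sum_cons,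
      List.map_map, Function.comp_def]
    have hlen : ∀ i ∈ List.range (vs.length - 2),
        Nat.factorial (childB vs hist i).1.length = Nat.factorial (vs.length - 2) := by
      intro i hi
      simp only [List.mem_range] at hi
      simp only [childB, List.length_append, List.length_take, List.length_drop,
        List.length_cons, List.length_nil]
      congr 1
      omega
    rw [List.map_congr_left hlen]
    simp only [List.map_const', List.length_range, List.sum_replicate, smul_eq_mul]
    have h1 : (vs.length - 2) * Nat.factorial (vs.length - 2) < Nat.factorial vs.length := by
      rcases Nat.lt_or_ge vs.length 2 with h | h
      · interval_cases _hv : vs.length <;> simp [Nat.factorial]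
      · calc (vs.length - 2) * Nat.factorial (vs.length - 2)
            < ((vs.length - 2) + 1) * Nat.factorial (vs.length - 2) :=
              Nat.mul_lt_mul_of_lt_of_le (by omega) le_rfl (Nat.factorial_pos _)
          _ = Nat.factorial ((vs.length - 2) + 1) := (Nat.factorial_succ _).symm
          _ ≤ Nat.factorial vs.length := Nat.factorial_le (by omega)
    omega

def num_of_true_alt (values : List String) : List (List String) :=
  goB [(values.map some, values)] []

-- ===== PRECONDITION & SPEC =====
def Spec_num_of_true (values : List String) (out : List (List String)) : Prop := out = num_of_true_alt values
instance (values : List String) (out : List (List String)) : Decidable (Spec_num_of_true values out) := by unfold Spec_num_of_true; infer_instance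

-- ===== CLAIM (what is proved, stated in full; the proofs are below) =====
def Claim_equal_num_of_true : Prop := ∀ (values : List String), Dom_num_of_true values → Spec_num_of_true values (num_of_true values)

-- ===== LEMMAS AND PROOFS =====

theorem goB_nil (results : List (List String)) : goB [] results = results := by
  rw [goB]

-- popping a frame and continuing equals running A's recursive helper on that frame first
theorem goB_helperA (n : Nat) :
    ∀ (vs : List (Option String)), vs.length < n → ∀ (hist : List String)
      (rest : List (List (Option String) × List String)) (results : List (List String)),
      goB ((vs, hist) :: rest) results = goB rest (helperA vs hist results) := by
  induction n with
  | zero => intro vs hvs; omega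
  | succ n ih =>
    intro vs hvs hist rest results
    rw [goB, helperA.eq_def]
    by_cases hc : vs.length = 1 ∧ vs.head? = some (some "T")
    · rw [if_pos hc, if_pos hc]
    · rw [if_neg hc, if_neg hc]
      have inner : ∀ (k i : Nat) (res : List (List String)), k = vs.length - 2 - i →
          goB (((List.range' i k).map (childB vs hist)) ++ rest) res
            = goB rest (loopA vs hist res i) := by
        intro k
        induction k with
        | zero =>
          intro i res hi
          rw [loopA.eq_def, if_neg (by omega)]
          simp
        | succ k ihk =>
          intro i res hi
          have hik : i < vs.length - 2 := by omega
          have hchild : ((childB vs hist i).1).length < n := by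
            simp only [childB, List.length_append, List.length_take, List.length_drop,
              List.length_cons, List.length_nil]
            omega
          rw [List.range'_succ, List.map_cons, List.cons_append,
            ih _ hchild _ _ _, ihk (i+1) _ (by omega)]
          conv_rhs => rw [loopA.eq_def]
          rw [if_pos hik]
          rfl
      have h0 := inner (vs.length - 2) 0 results (by omega)
      rwa [← List.range_eq_range'] at h0

theorem num_of_true_eq_alt (values : List String) :
    num_of_true values = num_of_true_alt values := by
  rw [num_of_true, num_of_true_alt,
    goB_helperA ((values.map some).length + 1) _ (by omega), goB_nil]

-- ===== VERDICT (by name: the statement is the Claim_ definition above) =====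
theorem num_of_true_spec : Claim_equal_num_of_true := by
  intro values _
  unfold Spec_num_of_true
  exact num_of_true_eq_alt values
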